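-- pv_equiv track=rewrite | github.com/mrsanjays/lab_allocation | lab_allocation.py | lab_allocation
-- ===== SOURCE A (Python) =====
-- def lab_allocation(L1,L2,L3,n):
--     l=[L1,L2,L3]
--     l.sort()
--     ans=None
--     for val in l:
--         if ans==None and n<=val:
--             ans=val
--
--     if ans==L1: return "L1"
--     elif ans==L2: return "L2"
--     else: return "L3"
-- ===== SOURCE B (Python) =====
-- def lab_allocation(L1, L2, L3, n):
--     fits = [(cap, name) for cap, name in ((L1, "L1"), (L2, "L2"), (L3, "L3")) if n <= cap]
--     return min(fits)[1] if fits else "L3"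
-- ===== Notes on version B (the rewrite author's own statement) =====
-- stated objective: simpler
-- what changed: Replaces A's sort of the three capacities, first-fit scan with a None sentinel, and value-rematching if/elif chain by one filter of labelled (capacity, label) candidates and a single lexicographic min with 'L3' default.
import Mathlib
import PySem

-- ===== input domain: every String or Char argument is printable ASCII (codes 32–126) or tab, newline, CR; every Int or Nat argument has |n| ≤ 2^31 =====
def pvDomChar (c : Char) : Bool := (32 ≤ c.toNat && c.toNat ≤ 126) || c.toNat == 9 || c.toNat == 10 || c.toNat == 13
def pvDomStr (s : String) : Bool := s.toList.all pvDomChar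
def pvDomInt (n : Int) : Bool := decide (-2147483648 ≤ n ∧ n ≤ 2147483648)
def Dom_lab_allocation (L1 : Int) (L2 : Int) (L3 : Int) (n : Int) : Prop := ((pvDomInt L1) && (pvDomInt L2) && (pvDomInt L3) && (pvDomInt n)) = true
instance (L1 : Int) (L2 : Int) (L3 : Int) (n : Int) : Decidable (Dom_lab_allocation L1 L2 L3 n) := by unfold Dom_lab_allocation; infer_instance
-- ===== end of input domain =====

-- B replaces A's sort + first-fit scan + value-rematching if-chain by a single filtered min over labelled candidates (objective: simpler).

-- ===== PORT A =====
def lab_allocation (L1 : Int) (L2 : Int) (L3 : Int) (n : Int) : String :=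
  let l := PySem.List.sorted [L1, L2, L3] (fun x => x) false
  let ans := l.foldl (fun ans val => if ans = none ∧ n ≤ val then some val else ans) (none : Option Int)
  -- Python's 'ans==L1' with ans possibly None: None==int is False
  if ans = some L1 then "L1"
  else if ans = some L2 then "L2"
  else "L3"

-- ===== PORT B =====
def lab_allocation_alt (L1 : Int) (L2 : Int) (L3 : Int) (n : Int) : String :=
  let fits := [(L1, "L1"), (L2, "L2"), (L3, "L3")].filter (fun c => n ≤ c.1)
  match fits with
  | [] => "L3"
  | x :: xs =>
    -- Python's min on (int, str) tuples: lexicographic, first minimal kept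
    (xs.foldl (fun m y => if y.1 < m.1 ∨ (y.1 = m.1 ∧ y.2 < m.2) then y else m) x).2

-- ===== PRECONDITION & SPEC =====
def Spec_lab_allocation (L1 : Int) (L2 : Int) (L3 : Int) (n : Int) (out : String) : Prop := out = lab_allocation_alt L1 L2 L3 n
instance (L1 : Int) (L2 : Int) (L3 : Int) (n : Int) (out : String) : Decidable (Spec_lab_allocation L1 L2 L3 n out) := by unfold Spec_lab_allocation; infer_instance

-- ===== CLAIM (what is proved, stated in full; the proofs are below) =====
def Claim_equal_lab_allocation : Prop := ∀ (L1 : Int) (L2 : Int) (L3 : Int) (n : Int), Dom_lab_allocation L1 L2 L3 n → Spec_lab_allocation L1 L2 L3 n (lab_allocation L1 L2 L3 n)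

-- ===== LEMMAS AND PROOFS =====

-- ===== VERDICT (by name: the statement is the Claim_ definition above) =====
set_option maxHeartbeats 4000000 in
set_option maxRecDepth 8000 in
theorem lab_allocation_spec : Claim_equal_lab_allocation := by
  intro L1 L2 L3 n _
  unfold Spec_lab_allocation lab_allocation lab_allocation_alt
  simp only [PySem.List.sorted_eq_foldl_insertBy, PySem.List.insertBy, List.foldl, List.filter]
  rcases lt_trichotomy L1 L2 with h12|h12|h12 <;>
  rcases lt_trichotomy L1 L3 with h13|h13|h13 <;>
  rcases lt_trichotomy L2 L3 with h23|h23|h23 <;>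
  by_cases hn1 : n ≤ L1 <;> by_cases hn2 : n ≤ L2 <;> by_cases hn3 : n ≤ L3 <;>
  (first | have c12 : L1 < L2 := by omega | have c12 : ¬ L1 < L2 := by omega) <;>
  (first | have c21 : L2 < L1 := by omega | have c21 : ¬ L2 < L1 := by omega) <;>
  (first | have c13 : L1 < L3 := by omega | have c13 : ¬ L1 < L3 := by omega) <;>
  (first | have c31 : L3 < L1 := by omega | have c31 : ¬ L3 < L1 := by omega) <;>
  (first | have c23 : L2 < L3 := by omega | have c23 : ¬ L2 < L3 := by omega) <;>
  (first | have c32 : L3 < L2 := by omega | have c32 : ¬ L3 < L2 := by omega) <;>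
  (first | have e12 : L1 = L2 := by omega | have e12 : L1 ≠ L2 := by omega) <;>
  (try have e21 : L2 ≠ L1 := by omega) <;>
  (first | have e13 : L1 = L3 := by omega | have e13 : L1 ≠ L3 := by omega) <;>
  (try have e31 : L3 ≠ L1 := by omega) <;>
  (first | have e23 : L2 = L3 := by omega | have e23 : L2 ≠ L3 := by omega) <;>
  (try have e32 : L3 ≠ L2 := by omega) <;>
  simp [PySem.List.sorted_eq_foldl_insertBy, PySem.List.insertBy, List.foldl, List.filter,
    c12, c21, c13, c31, c23, c32, e12, e13, e23, hn1, hn2, hn3] <;>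
  (try simp_all) <;> (try split_ifs) <;> (try simp_all [(by decide : ((['1']:List Char) < ['2'])), (by decide : (((['L','1']:List Char) < ['L','2']))), (by decide : ((['1']:List Char) < ['3'])), (by decide : (((['L','1']:List Char) < ['L','3']))), (by decide : ¬ ((['2']:List Char) < ['1'])), (by decide : ¬ (((['L','2']:List Char) < ['L','1']))), (by decide : ((['2']:List Char) < ['3'])), (by decide : (((['L','2']:List Char) < ['L','3']))), (by decide : ¬ ((['3']:List Char) < ['1'])), (by decide : ¬ (((['L','3']:List Char) < ['L','1']))), (by decide : ¬ ((['3']:List Char) < ['2'])), (by decide : ¬ (((['L','3']:List Char) < ['L','2'])))]) <;> (try omega)
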